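-- pv_equiv track=rewrite | github.com/ManishRacha12/myhackerrank | jjjj.py | substring_game
-- ===== SOURCE A (Python) =====
-- def substring_game(string):
--     s = string
--     length = len(s)
--     alice_score, bob_score = 0, 0
--
--     for i in range(length):
--         for j in range(i + 1, length + 1):
--             substring = s[i:j]
--             if len(substring) % 2 == 0:
--                 alice_score += 1
--             else:
--                 bob_score += 1
--
--     if alice_score > bob_score:
--         return f"Alice_score {alice_score}"
--     elif bob_score > alice_score:
--         return f"Bob_score {bob_score}"
--     else:
--         return "Draw"
-- ===== SOURCE B (Python) =====
-- def substring_game(string):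
--     n = len(string)
--     odd_lengths = (n + 1) // 2
--     even_lengths = n // 2
--     bob_score = odd_lengths * (n - odd_lengths + 1)
--     alice_score = even_lengths * (n - even_lengths)
--
--     if alice_score > bob_score:
--         return f"Alice_score {alice_score}"
--     elif bob_score > alice_score:
--         return f"Bob_score {bob_score}"
--     else:
--         return "Draw"
-- ===== Notes on version B (the rewrite author's own statement) =====
-- stated objective: faster
-- what changed: Replaces the O(n^2) double loop over all substrings with closed-form counts: there are (n+1-L) substrings of each length L, so the even/odd totals are floor(n/2)*(n-floor(n/2)) and ceil(n/2)*(n-ceil(n/2)+1).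
import Mathlib
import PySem

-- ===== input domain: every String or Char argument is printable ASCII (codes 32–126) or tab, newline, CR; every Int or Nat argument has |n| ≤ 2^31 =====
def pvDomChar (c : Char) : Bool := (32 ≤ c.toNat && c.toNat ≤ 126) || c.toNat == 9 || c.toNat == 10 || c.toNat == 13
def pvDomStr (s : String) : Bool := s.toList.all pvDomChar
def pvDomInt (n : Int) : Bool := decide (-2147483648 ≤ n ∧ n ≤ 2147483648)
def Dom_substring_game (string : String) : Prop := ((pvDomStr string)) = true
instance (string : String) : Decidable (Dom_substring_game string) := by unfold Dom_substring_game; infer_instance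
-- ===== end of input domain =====

-- B replaces A's O(n^2) double loop with closed-form counts of even/odd substring lengths.

-- ===== PORT A =====
def substring_game (string : String) : String :=
  let s := string
  let length : Int := PySem.Str.len s
  let scores : Int × Int :=
    (PySem.List.pyRange 0 length 1).foldl (fun ab i =>
      (PySem.List.pyRange (i + 1) (length + 1) 1).foldl (fun ab j =>
        let substring := PySem.Str.slice s (some i) (some j)
        if PySem.Int.mod (PySem.Str.len substring) 2 = 0 then
          (ab.1 + 1, ab.2)
        else
          (ab.1, ab.2 + 1)) ab) (0, 0)
  let alice_score := scores.1
  let bob_score := scores.2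
  if alice_score > bob_score then "Alice_score " ++ PySem.Int.toStr alice_score
  else if bob_score > alice_score then "Bob_score " ++ PySem.Int.toStr bob_score
  else "Draw"

-- ===== PORT B =====
def substring_game_alt (string : String) : String :=
  let n : Int := PySem.Str.len string
  let odd_lengths := PySem.Int.floordiv (n + 1) 2
  let even_lengths := PySem.Int.floordiv n 2
  let bob_score := odd_lengths * (n - odd_lengths + 1)
  let alice_score := even_lengths * (n - even_lengths)
  if alice_score > bob_score then "Alice_score " ++ PySem.Int.toStr alice_score
  else if bob_score > alice_score then "Bob_score " ++ PySem.Int.toStr bob_score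
  else "Draw"

-- ===== PRECONDITION & SPEC =====
def Spec_substring_game (string : String) (out : String) : Prop := out = substring_game_alt string
instance (string : String) (out : String) : Decidable (Spec_substring_game string out) := by unfold Spec_substring_game; infer_instance

-- ===== CLAIM (what is proved, stated in full; the proofs are below) =====
def Claim_equal_substring_game : Prop := ∀ (string : String), Dom_substring_game string → Spec_substring_game string (substring_game string)

-- ===== LEMMAS AND PROOFS =====

-- Inner loop of A: for fixed i with 0 ≤ i ≤ m ≤ n (n the string length), folding j over
-- pyRange (i+1) (m+1) 1 adds ⌊(m-i)/2⌋ to alice and ⌈(m-i)/2⌉ to bob.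
theorem sg_inner (s : String) (n : Nat) (hn : s.toList.length = n)
    (i m : Nat) (him : i ≤ m) (hmn : m ≤ n) (ab : Int × Int) :
    (PySem.List.pyRange ((i : Int) + 1) ((m : Int) + 1) 1).foldl (fun ab j =>
        let substring := PySem.Str.slice s (some (i : Int)) (some j)
        if PySem.Int.mod (PySem.Str.len substring) 2 = 0 then
          (ab.1 + 1, ab.2)
        else
          (ab.1, ab.2 + 1)) ab
      = (ab.1 + ((m - i) / 2 : Nat), ab.2 + ((m - i) - (m - i) / 2 : Nat)) := by
  induction m, him using Nat.le_induction with
  | base =>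
      rw [PySem.List.pyRange_one_eq_nil (le_refl _)]
      simp
  | succ m him ih =>
      have hc : ((m + 1 : Nat) : Int) = (m : Int) + 1 := by push_cast; ring
      rw [hc, PySem.List.pyRange_one_succ_right (by exact_mod_cast Int.add_le_add_right (Int.ofNat_le.mpr him) 1),
        List.foldl_append, ih (by omega)]
      have hlen : PySem.Str.len (PySem.Str.slice s (some (i : Int)) (some ((m : Int) + 1)))
          = ((m + 1 - i : Nat) : Int) := by
        rw [← hc]
        rw [PySem.Str.len_eq, PySem.Str.toList_slice, PySem.Chars.slice_eq_listSlice,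
          PySem.List.slice_natCast]
        simp [hn]
        omega
      simp only [List.foldl_cons, List.foldl_nil, hlen,
        PySem.Int.mod_eq_emod_of_pos (a := ((m + 1 - i : Nat) : Int)) (b := 2) (by norm_num)]
      by_cases hpar : (m + 1 - i) % 2 = 0
      · rw [if_pos (by omega), Prod.mk.injEq]
        exact ⟨by omega, by omega⟩
      · rw [if_neg (by omega), Prod.mk.injEq]
        exact ⟨by omega, by omega⟩

-- Outer loop of A from index k: with t = n - k remaining outer iterations, the accumulated
-- totals are the closed forms of B.
theorem sg_outer (s : String) (n : Nat) (hn : s.toList.length = n)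
    (t : Nat) (k : Nat) (ab : Int × Int) (hk : k + t = n) :
    (PySem.List.pyRange (k : Int) (n : Int) 1).foldl (fun ab i =>
      (PySem.List.pyRange (i + 1) ((n : Int) + 1) 1).foldl (fun ab j =>
        let substring := PySem.Str.slice s (some i) (some j)
        if PySem.Int.mod (PySem.Str.len substring) 2 = 0 then
          (ab.1 + 1, ab.2)
        else
          (ab.1, ab.2 + 1)) ab) ab
      = (ab.1 + ((t / 2 : Nat) : Int) * ((t : Int) - ((t / 2 : Nat) : Int)),
         ab.2 + (((t + 1) / 2 : Nat) : Int) * ((t : Int) - (((t + 1) / 2 : Nat) : Int) + 1)) := by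
  induction t generalizing k ab with
  | zero =>
      have hkn : (k : Int) = (n : Int) := by exact_mod_cast congrArg Nat.cast hk
      rw [hkn, PySem.List.pyRange_one_eq_nil (le_refl _)]
      simp
  | succ t ih =>
      rw [PySem.List.pyRange_one_cons (by exact_mod_cast (by omega : k < n)), List.foldl_cons]
      rw [sg_inner s n hn k n (by omega) (le_refl n) ab]
      have hc : ((k + 1 : Nat) : Int) = (k : Int) + 1 := by push_cast; ring
      rw [← hc, ih (k + 1) _ (by omega)]
      have hnk : n - k = t + 1 := by omega
      rw [hnk, Prod.mk.injEq]
      constructor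
      · -- alice component: (t+1)/2 added to the closed form for t gives the closed form for t+1
        rcases Nat.even_or_odd t with ⟨u, hu⟩ | ⟨u, hu⟩ <;> subst hu
        · have d1 : (u + u) / 2 = u := by omega
          have d2 : (u + u + 1) / 2 = u := by omega
          rw [d1, d2]
          push_cast
          ring
        · have d1 : (2 * u + 1) / 2 = u := by omega
          have d2 : (2 * u + 1 + 1) / 2 = u + 1 := by omega
          rw [d1, d2]
          push_cast
          ring
      · -- bob component
        rcases Nat.even_or_odd t with ⟨u, hu⟩ | ⟨u, hu⟩ <;> subst hu
        · have d1 : (u + u + 1) / 2 = u := by omega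
          have d2 : (u + u + 1 + 1) / 2 = u + 1 := by omega
          rw [d1, d2, show u + u + 1 - u = u + 1 from by omega]
          push_cast
          ring
        · have d1 : (2 * u + 1 + 1) / 2 = u + 1 := by omega
          have d2 : (2 * u + 1 + 1 + 1) / 2 = u + 1 := by omega
          rw [d1, d2, show 2 * u + 1 + 1 - (u + 1) = u + 1 from by omega]
          push_cast
          ring

-- ===== VERDICT (by name: the statement is the Claim_ definition above) =====
theorem substring_game_spec : Claim_equal_substring_game := by
  intro s _
  show substring_game s = substring_game_alt s
  unfold substring_game substring_game_alt
  simp only [PySem.Str.len_eq]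
  have hout := sg_outer s s.toList.length rfl s.toList.length 0 (0, 0) (by omega)
  simp only [Nat.cast_zero, zero_add, PySem.Str.len_eq] at hout
  rw [hout]
  have e1 : PySem.Int.floordiv ((s.toList.length : Int) + 1) 2
      = (((s.toList.length + 1) / 2 : Nat) : Int) := by
    rw [PySem.Int.floordiv_eq_ediv_of_pos (by norm_num)]
    omega
  have e2 : PySem.Int.floordiv ((s.toList.length : Int)) 2
      = (((s.toList.length) / 2 : Nat) : Int) := by
    rw [PySem.Int.floordiv_eq_ediv_of_pos (by norm_num)]
    omega
  rw [e1, e2]
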